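-- pv_equiv track=rewrite | github.com/vinhnguyen2005/AOIWarmUpHW | Day70/binary_Search.py | smallest_greater_than_x
-- ===== SOURCE A (Python) =====
-- def smallest_greater_than_x(arr, x):
--     left = 0
--     right = len(arr) - 1
--     while left <= right:
--         mid = left + (right - left) // 2
--         if arr[mid] >= x:
--             right = mid - 1
--         else:
--             left = mid + 1
--     return left if left < len(arr) else -1
-- ===== SOURCE B (Python) =====
-- def smallest_greater_than_x(arr, x):
--     # Divide-and-conquer on sublists: recurse on the slice itself, carrying the
--     # offset of the slice in the original list, instead of moving index bounds.
--     def go(sub, offset):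
--         if not sub:
--             return offset
--         m = (len(sub) - 1) // 2
--         if sub[m] >= x:
--             return go(sub[:m], offset)
--         return go(sub[m + 1:], offset + m + 1)
--     res = go(arr, 0)
--     return res if res < len(arr) else -1
-- ===== Notes on version B (the rewrite author's own statement) =====
-- stated objective: alternative
-- what changed: A's iterative while-loop over index bounds [left,right] is replaced by a divide-and-conquer recursion on the sublist itself (slicing and carrying the slice's offset), preserving the exact mid/branch traversal.
import Mathlib
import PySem

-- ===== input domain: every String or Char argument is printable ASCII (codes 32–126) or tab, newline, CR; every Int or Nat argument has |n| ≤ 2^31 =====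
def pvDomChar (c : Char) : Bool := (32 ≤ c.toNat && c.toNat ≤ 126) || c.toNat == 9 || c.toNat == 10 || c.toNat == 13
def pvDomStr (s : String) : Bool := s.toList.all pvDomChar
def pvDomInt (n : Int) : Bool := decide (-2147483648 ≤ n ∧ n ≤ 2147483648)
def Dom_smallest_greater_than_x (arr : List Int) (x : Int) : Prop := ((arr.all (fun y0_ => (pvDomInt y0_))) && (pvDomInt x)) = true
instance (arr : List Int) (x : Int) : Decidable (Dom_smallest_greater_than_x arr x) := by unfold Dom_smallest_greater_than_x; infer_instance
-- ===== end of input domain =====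

-- B rewrites A's index-bound while-loop as divide-and-conquer recursion on the slice
-- itself (carrying the slice's offset); same traversal, alternative decomposition.

-- ===== PORT A =====
-- the while loop of A, recursing on the shrinking window [left, right];
-- arr[mid] is always in range here, so the pyGet? default 0 is never used
def pvLoopA (arr : List Int) (x : Int) (left right : Int) : Int :=
  if _h : left ≤ right then
    let mid := left + PySem.Int.floordiv (right - left) 2
    if (PySem.List.pyGet? arr mid).getD 0 ≥ x then
      pvLoopA arr x left (mid - 1)
    else
      pvLoopA arr x (mid + 1) right
  else left
termination_by (right + 1 - left).toNat
decreasing_by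
  · rw [PySem.Int.floordiv_eq_ediv_of_pos (by omega)]; omega
  · rw [PySem.Int.floordiv_eq_ediv_of_pos (by omega)]; omega

def smallest_greater_than_x (arr : List Int) (x : Int) : Int :=
  let res := pvLoopA arr x 0 ((arr.length : Int) - 1)
  if res < (arr.length : Int) then res else -1

-- ===== PORT B =====
-- B's recursive helper: recursion on the sublist, offset = its start in arr
def pvGoB (x : Int) (sub : List Int) (offset : Int) : Int :=
  if sub.isEmpty then offset
  else
    let m := (sub.length - 1) / 2
    if sub.getD m 0 ≥ x then pvGoB x (sub.take m) offset
    else pvGoB x (sub.drop (m + 1)) (offset + (m : Int) + 1)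
termination_by sub.length
decreasing_by
  all_goals cases sub with
  | nil => simp_all
  | cons a t => simp; try omega

def smallest_greater_than_x_alt (arr : List Int) (x : Int) : Int :=
  let res := pvGoB x arr 0
  if res < (arr.length : Int) then res else -1

-- ===== PRECONDITION & SPEC =====
def Spec_smallest_greater_than_x (arr : List Int) (x : Int) (out : Int) : Prop := out = smallest_greater_than_x_alt arr x
instance (arr : List Int) (x : Int) (out : Int) : Decidable (Spec_smallest_greater_than_x arr x out) := by unfold Spec_smallest_greater_than_x; infer_instance

-- ===== CLAIM (what is proved, stated in full; the proofs are below) =====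
def Claim_equal_smallest_greater_than_x : Prop := ∀ (arr : List Int) (x : Int), Dom_smallest_greater_than_x arr x → Spec_smallest_greater_than_x arr x (smallest_greater_than_x arr x)

-- ===== LEMMAS AND PROOFS =====

-- invariant: if sub is the length-n window of arr starting at left, the loop on
-- [left, left+n-1] equals B's recursion on sub with offset left
lemma pvLoopA_eq_goB (arr : List Int) (x : Int) : ∀ (n : Nat) (sub : List Int) (left : Int),
    0 ≤ left → sub.length = n → sub = (arr.drop left.toNat).take n →
    pvLoopA arr x left (left + (n : Int) - 1) = pvGoB x sub left := by
  intro n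
  induction n using Nat.strong_induction_on with
  | _ n ih =>
    intro sub left hl hlen hsub
    cases n with
    | zero =>
      have hnil : sub = [] := List.length_eq_zero_iff.mp hlen
      rw [pvLoopA, pvGoB]
      simp [hnil]
    | succ k =>
      -- n = k+1 > 0
      have hne : sub ≠ [] := by intro h; simp [h] at hlen
      have hbound : k + 1 ≤ arr.length - left.toNat := by
        have := hsub ▸ hlen
        simp [List.length_take, List.length_drop] at this
        omega
      set m : Nat := k / 2 with hm
      have hmlt : m < k + 1 := by omega
      have hmid : left + PySem.Int.floordiv (left + (↑(k+1) : Int) - 1 - left) 2 = left + (m : Int) := by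
        have h1 : left + (↑(k+1) : Int) - 1 - left = (k : Int) := by push_cast; ring
        rw [h1, PySem.Int.floordiv_eq_ediv_of_pos (by norm_num)]
        omega
      -- the element compared: arr[left+m] = sub[m]
      have hget : (PySem.List.pyGet? arr (left + (m : Int))).getD 0 = sub.getD m 0 := by
        have hnn : (0:Int) ≤ left + (m:Int) := by omega
        rw [PySem.List.pyGet?_of_nonneg arr hnn]
        have htn : (left + (m:Int)).toNat = left.toNat + m := by omega
        rw [htn]
        have hidx : arr[left.toNat + m]? = sub[m]? := by
          conv_rhs => rw [hsub]
          rw [List.getElem?_take_of_lt (by omega), List.getElem?_drop]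
        rw [hidx, List.getD_eq_getElem?_getD]
      rw [pvLoopA]
      have hcond : left ≤ left + (↑(k+1) : Int) - 1 := by push_cast; omega
      simp only [hcond, dif_pos]
      rw [hmid, hget]
      rw [pvGoB]
      simp only [List.isEmpty_iff, hne, if_false, hlen]
      have hm' : (k + 1 - 1) / 2 = m := by omega
      rw [hm']
      by_cases hc : sub.getD m 0 ≥ x
      · simp only [if_pos hc]
        have := ih m hmlt (sub.take m) left hl
          (by simp [List.length_take]; omega)
          (by rw [hsub, List.take_take]; congr 1; omega)
        exact this
      · simp only [if_neg hc]
        have hlt : k + 1 - m - 1 < k + 1 := by omega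
        have := ih (k + 1 - m - 1) hlt (sub.drop (m+1)) (left + (m:Int) + 1)
          (by omega)
          (by simp [List.length_drop]; omega)
          (by
            rw [hsub, List.drop_take, List.drop_drop]
            have : (left + (m:Int) + 1).toNat = left.toNat + (m + 1) := by omega
            rw [this]
            congr 1)
        rw [← this]
        congr 1
        omega

-- ===== VERDICT (by name: the statement is the Claim_ definition above) =====
theorem smallest_greater_than_x_spec : Claim_equal_smallest_greater_than_x := by
  intro arr x _
  unfold Spec_smallest_greater_than_x smallest_greater_than_x smallest_greater_than_x_alt
  have h := pvLoopA_eq_goB arr x arr.length arr 0 le_rfl rfl (by simp)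
  simp only [zero_add] at h
  rw [h]
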